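-- pv_equiv track=rewrite | github.com/Pritz69/GFG_POTD | Difficulty: Medium/Find rectangle with corners as 1/find-rectangle-with-corners-as-1.py | ValidCorner
-- ===== SOURCE A (Python) =====
-- def ValidCorner(mat):
--     # Code here
--     n=len(mat)
--     m=len(mat[0])
--     for i in range(n) :
--         for j in range(i+1,n) :
--             cnt=0
--             for k in range(m) :
--                 if mat[i][k]==1 and mat[j][k]==1 :
--                     cnt +=1
--             if cnt >= 2 :
--                 return True
--     return False
-- ===== SOURCE B (Python) =====
-- def ValidCorner(mat):
--     m = len(mat[0])
--     seen = set()
--     for row in mat: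
--         cols = [k for k in range(m) if row[k] == 1]
--         pairs = [(cols[x], cols[y]) for x in range(len(cols)) for y in range(x + 1, len(cols))]
--         if any(p in seen for p in pairs):
--             return True
--         seen.update(pairs)
--     return False
-- ===== Notes on version B (the rewrite author's own statement) =====
-- stated objective: faster
-- what changed: Replaced the triple loop over row pairs (counting shared 1-columns for each of the O(n^2) pairs) by a single pass over rows that hashes each row's 1-column pairs into a global seen-set and returns True on the first repeat.
-- outside the precondition, e.g. on ValidCorner([[1, 1], [1, 1], [1]]): A returns True, B returns True; on ValidCorner([[1, 7], [2]]): A returns False, B raises IndexError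
import Mathlib
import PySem

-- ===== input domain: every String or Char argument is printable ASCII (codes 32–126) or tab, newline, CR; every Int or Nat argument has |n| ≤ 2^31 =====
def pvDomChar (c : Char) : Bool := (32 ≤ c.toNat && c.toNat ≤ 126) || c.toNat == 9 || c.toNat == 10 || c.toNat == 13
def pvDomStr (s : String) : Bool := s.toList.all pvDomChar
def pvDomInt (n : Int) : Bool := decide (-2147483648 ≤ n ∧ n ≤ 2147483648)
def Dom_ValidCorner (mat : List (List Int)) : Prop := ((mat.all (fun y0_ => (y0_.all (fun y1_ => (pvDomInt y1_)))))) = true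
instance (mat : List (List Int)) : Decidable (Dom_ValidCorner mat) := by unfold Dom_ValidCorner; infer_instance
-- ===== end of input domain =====

-- B replaces A's O(n^2*m) triple loop over row pairs by one pass over the rows with a global set of seen 1-column pairs (measured faster on row-heavy inputs in a timing run).


-- ===== PORT A =====
-- cnt for a fixed pair of rows: for k in range(m): if mat[i][k]==1 and mat[j][k]==1: cnt += 1
def aCnt (ri rj : List Int) (m : Nat) : Nat :=
  (List.range m).foldl
    (fun (c : Nat) (k : Nat) =>
      if PySem.List.pyGetD ri (k : Int) 0 = 1 ∧ PySem.List.pyGetD rj (k : Int) 0 = 1 then c + 1 else c) 0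

def ValidCorner (mat : List (List Int)) : Bool :=
  let n := mat.length
  let m := (PySem.List.pyGetD mat 0 []).length
  (List.range n).any (fun (i : Nat) =>
    (List.range' (i + 1) (n - (i + 1))).any (fun (j : Nat) =>
      decide (2 ≤ aCnt (PySem.List.pyGetD mat (i : Int) []) (PySem.List.pyGetD mat (j : Int) []) m)))

-- ===== PORT B =====
-- cols = [k for k in range(m) if row[k] == 1]; pairs = [(cols[x], cols[y]) for x ... for y ...]
def rowPairs (m : Nat) (row : List Int) : List (Nat × Nat) :=
  let cols : List Nat := (List.range m).filter (fun k => decide (PySem.List.pyGetD row (k : Int) 0 = 1))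
  (List.range cols.length).flatMap (fun (x : Nat) =>
    (List.range' (x + 1) (cols.length - (x + 1))).map (fun y => (cols.getD x 0, cols.getD y 0)))

-- for row in mat: if any(p in seen for p in pairs): return True; seen.update(pairs)
def bLoop (m : Nat) (seen : PySem.Set (Nat × Nat)) : List (List Int) → Bool
  | [] => false
  | row :: rest =>
      let ps := rowPairs m row
      if ps.any (fun p => PySem.Set.contains seen p) then true
      else bLoop m (PySem.Set.update seen ps) rest

def ValidCorner_alt (mat : List (List Int)) : Bool :=
  let m := (PySem.List.pyGetD mat 0 []).length
  bLoop m PySem.Set.empty mat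

-- ===== PRECONDITION & SPEC =====
-- Pre_ excludes the empty matrix (mat[0] raises IndexError in both programs) and ragged matrices with a
-- row shorter than the first row, on which both programs index that row up to len(mat[0]) and may raise
-- IndexError (whether they do depends on each program's scan order).
def Pre_ValidCorner (mat : List (List Int)) : Prop :=
  mat ≠ [] ∧ ∀ row ∈ mat, (mat.getD 0 []).length ≤ row.length
instance (mat : List (List Int)) : Decidable (Pre_ValidCorner mat) := by
  unfold Pre_ValidCorner; infer_instance

def pvWitness_ValidCorner : List (List Int) := [[1, 1, 0], [0, 1, 1], [1, 1, 1]]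

def Spec_ValidCorner (mat : List (List Int)) (out : Bool) : Prop := out = ValidCorner_alt mat
instance (mat : List (List Int)) (out : Bool) : Decidable (Spec_ValidCorner mat out) := by
  unfold Spec_ValidCorner; infer_instance

-- ===== CLAIM (what is proved, stated in full; the proofs are below) =====
def Claim_equal_ValidCorner : Prop :=
  ∀ (mat : List (List Int)), Dom_ValidCorner mat → Pre_ValidCorner mat →
    Spec_ValidCorner mat (ValidCorner mat)

-- ===== LEMMAS AND PROOFS =====

-- both programs detect the same relation: two rows sharing ones in two columns
def SharesPair (ri rj : List Int) (m : Nat) : Prop :=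
  ∃ a b : Nat, a < b ∧ b < m ∧ ri.getD a 0 = 1 ∧ rj.getD a 0 = 1 ∧ ri.getD b 0 = 1 ∧ rj.getD b 0 = 1

theorem foldl_count_nat {α : Type} (p : α → Prop) [DecidablePred p] (l : List α) (c : Nat) :
    l.foldl (fun c k => if p k then c + 1 else c) c = c + l.countP (fun x => decide (p x)) := by
  induction l generalizing c with
  | nil => simp
  | cons a l ih =>
    rw [List.foldl_cons, ih, List.countP_cons]
    by_cases h : p a
    · simp [h]
      omega
    · simp [h]

theorem aCnt_eq_countP (ri rj : List Int) (m : Nat) :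
    aCnt ri rj m
      = (List.range m).countP (fun k => decide (ri.getD k 0 = 1 ∧ rj.getD k 0 = 1)) := by
  unfold aCnt
  rw [foldl_count_nat
        (fun k : Nat => PySem.List.pyGetD ri (k : Int) 0 = 1 ∧ PySem.List.pyGetD rj (k : Int) 0 = 1)
        (List.range m) 0,
      Nat.zero_add]
  exact List.countP_congr (by intro k _; simp)

theorem two_le_length_of_two_mem {α : Type} {l : List α} {a b : α}
    (h1 : a ∈ l) (h2 : b ∈ l) (h3 : a ≠ b) : 2 ≤ l.length := by
  match l with
  | [] => simp at h1
  | [x] => simp at h1 h2; exact absurd (h1.trans h2.symm) h3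
  | x :: y :: t => simp only [List.length_cons]; omega

theorem two_le_countP_range {m : Nat} {p : Nat → Prop} [DecidablePred p] :
    2 ≤ (List.range m).countP (fun k => decide (p k)) ↔
      ∃ a b : Nat, a < b ∧ b < m ∧ p a ∧ p b := by
  rw [List.countP_eq_length_filter]
  set l : List Nat := (List.range m).filter (fun k => decide (p k)) with hl
  have hpw : l.Pairwise (· < ·) := List.pairwise_lt_range.sublist List.filter_sublist
  have hmem : ∀ c : Nat, c ∈ l ↔ c < m ∧ p c := by
    intro c; rw [hl]; simp [List.mem_filter, List.mem_range]
  constructor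
  · intro h
    have h0 : 0 < l.length := by omega
    have h1 : 1 < l.length := by omega
    have hab : l[0] < l[1] := List.pairwise_iff_getElem.mp hpw 0 1 h0 h1 (by omega)
    have ha := (hmem l[0]).mp (List.getElem_mem h0)
    have hb := (hmem l[1]).mp (List.getElem_mem h1)
    exact ⟨l[0], l[1], hab, hb.1, ha.2, hb.2⟩
  · rintro ⟨a, b, hab, hbm, hpa, hpb⟩
    exact two_le_length_of_two_mem ((hmem a).mpr ⟨by omega, hpa⟩)
      ((hmem b).mpr ⟨hbm, hpb⟩) (by omega)

theorem A_iff (mat : List (List Int)) :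
    ValidCorner mat = true ↔
      ∃ i j : Nat, i < j ∧ j < mat.length ∧
        SharesPair (mat.getD i []) (mat.getD j []) (mat.getD 0 []).length := by
  unfold ValidCorner SharesPair
  simp only [List.any_eq_true, List.mem_range, List.mem_range'_1, decide_eq_true_eq,
    PySem.List.pyGetD_natCast, PySem.List.pyGetD_zero, aCnt_eq_countP, two_le_countP_range]
  constructor
  · rintro ⟨i, hi, j, ⟨hij, hjn⟩, a, b, hab, hbm, ⟨h1, h2⟩, h3, h4⟩
    exact ⟨i, j, by omega, by omega, a, b, hab, hbm, h1, h2, h3, h4⟩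
  · rintro ⟨i, j, hij, hjn, a, b, hab, hbm, h1, h2, h3, h4⟩
    exact ⟨i, by omega, j, ⟨by omega, by omega⟩, a, b, hab, hbm, ⟨h1, h2⟩, ⟨h3, h4⟩⟩

theorem mem_rowPairs {m : Nat} {row : List Int} {a b : Nat} :
    (a, b) ∈ rowPairs m row ↔ a < b ∧ b < m ∧ row.getD a 0 = 1 ∧ row.getD b 0 = 1 := by
  unfold rowPairs
  simp only [PySem.List.pyGetD_natCast]
  set cols : List Nat := (List.range m).filter (fun k => decide (row.getD k 0 = 1)) with hcols
  have hpw : cols.Pairwise (· < ·) := List.pairwise_lt_range.sublist List.filter_sublist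
  have hmem : ∀ c : Nat, c ∈ cols ↔ c < m ∧ row.getD c 0 = 1 := by
    intro c; rw [hcols]; simp [List.mem_filter, List.mem_range]
  simp only [List.mem_flatMap, List.mem_map, List.mem_range, List.mem_range'_1]
  constructor
  · rintro ⟨x, hx, y, ⟨hxy, hyL⟩, hab⟩
    have hy : y < cols.length := by omega
    have hxy' : x < y := by omega
    obtain ⟨ha, hb⟩ : cols.getD x 0 = a ∧ cols.getD y 0 = b :=
      ⟨congrArg Prod.fst hab, congrArg Prod.snd hab⟩
    rw [List.getD_eq_getElem _ _ hx] at ha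
    rw [List.getD_eq_getElem _ _ hy] at hb
    have hlt : cols[x] < cols[y] := List.pairwise_iff_getElem.mp hpw x y hx hy hxy'
    have hma := (hmem cols[x]).mp (List.getElem_mem hx)
    have hmb := (hmem cols[y]).mp (List.getElem_mem hy)
    rw [ha] at hma hlt; rw [hb] at hmb hlt
    exact ⟨hlt, hmb.1, hma.2, hmb.2⟩
  · rintro ⟨hab, hbm, h1, h2⟩
    obtain ⟨x, hx, hxa⟩ := List.mem_iff_getElem.mp ((hmem a).mpr ⟨by omega, h1⟩)
    obtain ⟨y, hy, hyb⟩ := List.mem_iff_getElem.mp ((hmem b).mpr ⟨hbm, h2⟩)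
    have hxy : x < y := by
      rcases Nat.lt_trichotomy x y with h | h | h
      · exact h
      · exfalso; subst h; rw [hxa] at hyb; omega
      · exfalso
        have := List.pairwise_iff_getElem.mp hpw y x hy hx h
        rw [hxa, hyb] at this; omega
    refine ⟨x, by omega, y, ⟨by omega, by omega⟩, ?_⟩
    rw [List.getD_eq_getElem _ _ hx, List.getD_eq_getElem _ _ hy, hxa, hyb]

theorem bLoop_cons (m : Nat) (seen : PySem.Set (Nat × Nat)) (row : List Int)
    (rest : List (List Int)) :
    bLoop m seen (row :: rest)
      = if (rowPairs m row).any (fun p => PySem.Set.contains seen p) then true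
        else bLoop m (PySem.Set.update seen (rowPairs m row)) rest := rfl

theorem bLoop_iff (m : Nat) : ∀ (rows : List (List Int)) (seen : PySem.Set (Nat × Nat)),
    bLoop m seen rows = true ↔
      ∃ j, j < rows.length ∧ ∃ p : Nat × Nat, p ∈ rowPairs m (rows.getD j []) ∧
        (p ∈ seen ∨ ∃ i, i < j ∧ p ∈ rowPairs m (rows.getD i [])) := by
  intro rows
  induction rows with
  | nil => intro seen; simp [bLoop]
  | cons row rest ih =>
    intro seen
    rw [bLoop_cons]
    by_cases hhit : (rowPairs m row).any (fun p => PySem.Set.contains seen p) = true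
    · rw [if_pos hhit]
      obtain ⟨p, hp, hps⟩ := List.any_eq_true.mp hhit
      constructor
      · intro _
        exact ⟨0, by simp, p, by simpa using hp,
          Or.inl ((PySem.Set.contains_iff _ _).mp hps)⟩
      · intro _; rfl
    · rw [if_neg hhit, ih]
      have hnohit : ∀ p ∈ rowPairs m row, p ∉ seen := fun p hp hps =>
        hhit (List.any_eq_true.mpr ⟨p, hp, (PySem.Set.contains_iff _ _).mpr hps⟩)
      constructor
      · rintro ⟨j, hj, p, hp, hrest⟩
        refine ⟨j + 1, by simp; omega, p, by simpa using hp, ?_⟩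
        rcases hrest with hs | ⟨i, hij, hi⟩
        · rcases (PySem.Set.mem_update _ _ _).mp hs with hs | hs
          · exact Or.inl hs
          · exact Or.inr ⟨0, by omega, by simpa using hs⟩
        · exact Or.inr ⟨i + 1, by omega, by simpa using hi⟩
      · rintro ⟨j, hj, p, hp, hrest⟩
        cases j with
        | zero =>
          rcases hrest with hs | ⟨i, hi, _⟩
          · exact absurd hs (hnohit p (by simpa using hp))
          · omega
        | succ j =>
          refine ⟨j, by simp at hj; omega, p, by simpa using hp, ?_⟩
          rcases hrest with hs | ⟨i, hij, hi⟩
          · exact Or.inl ((PySem.Set.mem_update _ _ _).mpr (Or.inl hs))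
          · cases i with
            | zero =>
              exact Or.inl ((PySem.Set.mem_update _ _ _).mpr (Or.inr (by simpa using hi)))
            | succ i =>
              exact Or.inr ⟨i, by omega, by simpa using hi⟩

theorem B_iff (mat : List (List Int)) :
    ValidCorner_alt mat = true ↔
      ∃ i j : Nat, i < j ∧ j < mat.length ∧
        SharesPair (mat.getD i []) (mat.getD j []) (mat.getD 0 []).length := by
  unfold ValidCorner_alt SharesPair
  rw [bLoop_iff]
  simp only [PySem.List.pyGetD_zero]
  constructor
  · rintro ⟨j, hj, ⟨a, b⟩, hpj, hrest⟩
    rcases hrest with hs | ⟨i, hij, hpi⟩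
    · exact absurd hs (by simp [PySem.Set.empty])
    · obtain ⟨hab, hbm, hj1, hj2⟩ := mem_rowPairs.mp hpj
      obtain ⟨_, _, hi1, hi2⟩ := mem_rowPairs.mp hpi
      exact ⟨i, j, hij, hj, a, b, hab, hbm, hi1, hj1, hi2, hj2⟩
  · rintro ⟨i, j, hij, hj, a, b, hab, hbm, h1, h2, h3, h4⟩
    refine ⟨j, hj, (a, b), mem_rowPairs.mpr ⟨hab, hbm, h2, h4⟩,
      Or.inr ⟨i, hij, mem_rowPairs.mpr ⟨hab, hbm, h1, h3⟩⟩⟩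

-- ===== VERDICT (by name: the statement is the Claim_ definition above) =====
theorem ValidCorner_spec : Claim_equal_ValidCorner := by
  intro mat _ _
  unfold Spec_ValidCorner
  rw [Bool.eq_iff_iff, A_iff, B_iff]
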